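-- pv_equiv track=rewrite | github.com/ferreret/docscan | app/services/script_stubs.py | strip_stubs
-- ===== SOURCE A (Python) =====
-- STUB_DELIMITER = "# === DOCSCAN STUBS (no editar) ==="
--
-- def strip_stubs(code: str) -> str:
--     """Elimina el bloque de stubs de un código fuente."""
--     lines = code.split("\n")
--     result = []
--     inside_stubs = False
--     found_end = False
--
--     for line in lines:
--         if line.strip() == STUB_DELIMITER:
--             if not inside_stubs:
--                 inside_stubs = True
--                 continue
--             else:
--                 inside_stubs = False
--                 found_end = True
--                 continue
--         if not inside_stubs:
--             result.append(line)
--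
--     # Si no encontramos bloque completo, devolver el código original
--     if inside_stubs and not found_end:
--         return code
--
--     # Eliminar líneas vacías al inicio resultantes de eliminar stubs
--     while result and not result[0].strip():
--         result.pop(0)
--
--     return "\n".join(result)
-- ===== SOURCE B (Python) =====
-- STUB_DELIMITER = "# === DOCSCAN STUBS (no editar) ==="
--
--
-- def _remove_blocks(lines):
--     """Recursive: keep up to the first delimiter, skip to its partner, recurse."""
--     for i, line in enumerate(lines):
--         if line.strip() == STUB_DELIMITER:
--             for j in range(i + 1, len(lines)):
--                 if lines[j].strip() == STUB_DELIMITER: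
--                     return lines[:i] + _remove_blocks(lines[j + 1:])
--             return lines[:i]
--     return lines
--
--
-- def strip_stubs(code: str) -> str:
--     """Elimina el bloque de stubs de un código fuente."""
--     lines = code.split("\n")
--     if sum(1 for line in lines if line.strip() == STUB_DELIMITER) == 1:
--         return code
--     kept = _remove_blocks(lines)
--     start = 0
--     while start < len(kept) and not kept[start].strip():
--         start += 1
--     return "\n".join(kept[start:])
-- ===== Notes on version B (the rewrite author's own statement) =====
-- stated objective: alternative
-- what changed: Replaces A's single-pass boolean state machine (inside/found_end flags accumulated over every line) by a count pass for the single-delimiter case plus a recursive slice-based helper that finds each delimiter pair and concatenates the kept slices.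
import Mathlib
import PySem

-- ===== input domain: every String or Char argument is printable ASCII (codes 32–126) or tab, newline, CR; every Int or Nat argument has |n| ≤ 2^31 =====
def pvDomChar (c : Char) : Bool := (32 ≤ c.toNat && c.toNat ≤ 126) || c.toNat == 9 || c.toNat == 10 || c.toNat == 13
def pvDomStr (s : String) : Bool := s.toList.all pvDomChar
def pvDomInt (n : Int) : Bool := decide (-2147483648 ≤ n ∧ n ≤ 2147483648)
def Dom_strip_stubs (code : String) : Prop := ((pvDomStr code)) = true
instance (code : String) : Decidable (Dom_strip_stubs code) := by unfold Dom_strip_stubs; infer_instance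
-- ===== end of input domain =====

-- B is an alternative decomposition (count pass + recursive pair-slicing) of A's one-pass
-- flag state machine; same behaviour, same asymptotic cost.

-- the module constant STUB_DELIMITER
def pvDelim : String := "# === DOCSCAN STUBS (no editar) ==="

-- ===== PORT A =====
-- 'while result and not result[0].strip(): result.pop(0)'
def popBlanksA : List String → List String
  | [] => []
  | l :: ls => if PySem.Str.strip l == "" then popBlanksA ls else l :: ls

def stripStubsStep (s : List String × Bool × Bool) (line : String) : List String × Bool × Bool :=
  if PySem.Str.strip line == pvDelim then
    if !s.2.1 then (s.1, true, s.2.2) else (s.1, false, true)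
  else if !s.2.1 then (s.1 ++ [line], s.2.1, s.2.2) else s

def strip_stubs (code : String) : String :=
  let lines := (PySem.Str.split? code "\n").getD []
  let st := lines.foldl stripStubsStep ([], false, false)
  if st.2.1 && !st.2.2 then code
  else PySem.Str.join "\n" (popBlanksA st.1)

-- ===== PORT B =====
-- '_remove_blocks': find the first delimiter (outer for), find its partner (inner for),
-- keep the slices around the pair, recursing on the tail slice lines[j+1:].
def altRemoveBlocks (lines : List String) : List String :=
  match h : lines.findIdx? (fun l => PySem.Str.strip l == pvDelim) with
  | none => lines
  | some i =>
    match (lines.drop (i + 1)).findIdx? (fun l => PySem.Str.strip l == pvDelim) with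
    | none => lines.take i
    | some j => lines.take i ++ altRemoveBlocks (lines.drop (i + 1 + (j + 1)))
termination_by lines.length
decreasing_by
  have hi : i < lines.length := (List.findIdx?_eq_some_iff_findIdx_eq.mp h).1
  simp [List.length_drop]; omega

-- 'start = 0; while start < len(kept) and not kept[start].strip(): start += 1' then kept[start:]
def altDropLeadingBlanks : List String → List String
  | [] => []
  | l :: ls => if PySem.Str.strip l == "" then altDropLeadingBlanks ls else l :: ls

def strip_stubs_alt (code : String) : String :=
  let lines := (PySem.Str.split? code "\n").getD []
  if lines.countP (fun l => PySem.Str.strip l == pvDelim) == 1 then code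
  else PySem.Str.join "\n" (altDropLeadingBlanks (altRemoveBlocks lines))

-- ===== PRECONDITION & SPEC =====
def Spec_strip_stubs (code : String) (out : String) : Prop := out = strip_stubs_alt code
instance (code : String) (out : String) : Decidable (Spec_strip_stubs code out) := by unfold Spec_strip_stubs; infer_instance

-- ===== CLAIM (what is proved, stated in full; the proofs are below) =====
def Claim_equal_strip_stubs : Prop := ∀ (code : String), Dom_strip_stubs code → Spec_strip_stubs code (strip_stubs code)

-- ===== LEMMAS AND PROOFS =====

-- proof-side characterisation: the kept lines, as a mutual keep/skip recursion
mutual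
def keepRec : List String → List String
  | [] => []
  | l :: ls => if PySem.Str.strip l == pvDelim then skipRec ls else l :: keepRec ls
def skipRec : List String → List String
  | [] => []
  | l :: ls => if PySem.Str.strip l == pvDelim then keepRec ls else skipRec ls
end

theorem keepRec_no_delim (ls : List String)
    (h : ∀ l ∈ ls, (PySem.Str.strip l == pvDelim) = false) : keepRec ls = ls := by
  induction ls with
  | nil => rfl
  | cons l ls ih =>
    simp only [keepRec, h l (List.mem_cons_self ..)]
    simp [ih fun x hx => h x (List.mem_cons_of_mem _ hx)]

theorem skipRec_no_delim (ls : List String)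
    (h : ∀ l ∈ ls, (PySem.Str.strip l == pvDelim) = false) : skipRec ls = [] := by
  induction ls with
  | nil => rfl
  | cons l ls ih =>
    simp only [skipRec, h l (List.mem_cons_self ..)]
    simp [ih fun x hx => h x (List.mem_cons_of_mem _ hx)]

theorem keepRec_append_no (as ds : List String)
    (h : ∀ l ∈ as, (PySem.Str.strip l == pvDelim) = false) :
    keepRec (as ++ ds) = as ++ keepRec ds := by
  induction as with
  | nil => rfl
  | cons a as ih =>
    simp only [List.cons_append, keepRec, h a (List.mem_cons_self ..)]
    simp [ih fun x hx => h x (List.mem_cons_of_mem _ hx)]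

theorem skipRec_append_no (as ds : List String)
    (h : ∀ l ∈ as, (PySem.Str.strip l == pvDelim) = false) :
    skipRec (as ++ ds) = skipRec ds := by
  induction as with
  | nil => rfl
  | cons a as ih =>
    simp only [List.cons_append, skipRec, h a (List.mem_cons_self ..)]
    exact ih fun x hx => h x (List.mem_cons_of_mem _ hx)

-- the state machine's full characterisation, both phases at once
theorem foldl_step_spec (ls : List String) : ∀ (acc : List String) (fe : Bool),
    (ls.foldl stripStubsStep (acc, false, fe) =
      (acc ++ keepRec ls,
       decide (ls.countP (fun l => PySem.Str.strip l == pvDelim) % 2 = 1),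
       fe || decide (2 ≤ ls.countP (fun l => PySem.Str.strip l == pvDelim)))) ∧
    (ls.foldl stripStubsStep (acc, true, fe) =
      (acc ++ skipRec ls,
       decide (ls.countP (fun l => PySem.Str.strip l == pvDelim) % 2 = 0),
       fe || decide (1 ≤ ls.countP (fun l => PySem.Str.strip l == pvDelim)))) := by
  induction ls with
  | nil => intro acc fe; simp [keepRec, skipRec]
  | cons l ls ih =>
    intro acc fe
    rcases hb : (PySem.Str.strip l == pvDelim) with _ | _
    · constructor
      · simp only [List.foldl_cons, stripStubsStep, hb, Bool.false_eq_true, if_false,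
          Bool.not_false, if_true, keepRec, List.countP_cons]
        rw [(ih (acc ++ [l]) fe).1]
        simp
      · simp only [List.foldl_cons, stripStubsStep, hb, Bool.false_eq_true, if_false,
          Bool.not_true, skipRec, List.countP_cons]
        rw [(ih acc fe).2]
        simp
    · constructor
      · simp only [List.foldl_cons, stripStubsStep, hb, if_true, Bool.not_false, if_true,
          keepRec, List.countP_cons]
        rw [(ih acc fe).2]
        simp only [Prod.mk.injEq, hb, if_true]
        refine ⟨trivial, ?_, ?_⟩
        · exact decide_eq_decide.mpr (by omega)
        · rw [decide_eq_decide.mpr (show 1 ≤ ls.countP (fun l => PySem.Str.strip l == pvDelim) ↔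
            2 ≤ ls.countP (fun l => PySem.Str.strip l == pvDelim) + 1 by omega)]
      · simp only [List.foldl_cons, stripStubsStep, hb, if_true, Bool.not_true,
          Bool.false_eq_true, if_false, skipRec, List.countP_cons]
        rw [(ih acc true).1]
        simp only [Prod.mk.injEq, hb, if_true]
        refine ⟨trivial, decide_eq_decide.mpr (by omega), ?_⟩
        have : decide (1 ≤ ls.countP (fun l => PySem.Str.strip l == pvDelim) + 1) = true := by
          simp
        simp [this]

-- prefix lines before a findIdx? hit are non-delimiters
theorem take_no_delim (xs : List String) (i : Nat) (hi : i < xs.length)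
    (h : ∀ (j : Nat) (hji : j < i), ¬(PySem.Str.strip (xs[j]'(by omega)) == pvDelim) = true) :
    ∀ l ∈ xs.take i, (PySem.Str.strip l == pvDelim) = false := by
  intro l hl
  obtain ⟨k, hk, hget⟩ := List.getElem_of_mem hl
  have hk' : k < i := lt_of_lt_of_le hk (by simpa using List.length_take_le i xs)
  have := h k hk'
  rw [List.getElem_take] at hget
  rw [← hget]
  simpa using this

theorem altRemoveBlocks_eq_keepRec (lines : List String) :
    altRemoveBlocks lines = keepRec lines := by
  induction lines using altRemoveBlocks.induct with
  | case1 lines h =>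
    rw [altRemoveBlocks]
    split
    · exact (keepRec_no_delim lines (by simpa using List.findIdx?_eq_none_iff.mp h)).symm
    · rename_i i' h'; rw [h] at h'; cases h'
  | case2 lines i h h2 =>
    rw [altRemoveBlocks]
    split
    · rename_i h'; rw [h] at h'; cases h'
    rename_i i' h'
    rw [h] at h'; injection h' with hii; subst hii
    split
    · obtain ⟨hi, hpi, hmin⟩ := List.findIdx?_eq_some_iff_getElem.mp h
      have hrest := List.findIdx?_eq_none_iff.mp h2
      conv_rhs => rw [← List.take_append_drop i lines]
      rw [keepRec_append_no _ _ (take_no_delim lines i hi hmin),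
          List.drop_eq_getElem_cons hi]
      simp only [keepRec, hpi, if_true]
      rw [skipRec_no_delim _ (by simpa using hrest), List.append_nil]
    · rename_i j' hj'; rw [h2] at hj'; cases hj'
  | case3 lines i h j h2 ih =>
    rw [altRemoveBlocks]
    split
    · rename_i h'; rw [h] at h'; cases h'
    rename_i i' h'
    rw [h] at h'; injection h' with hii; subst hii
    split
    case _ hj' => rw [h2] at hj'; cases hj'
    rename_i j' hj'
    rw [h2] at hj'; injection hj' with hjj; subst hjj
    obtain ⟨hi, hpi, hmin⟩ := List.findIdx?_eq_some_iff_getElem.mp h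
    obtain ⟨hj, hpj, hminj⟩ := List.findIdx?_eq_some_iff_getElem.mp h2
    conv_rhs => rw [← List.take_append_drop i lines]
    rw [keepRec_append_no _ _ (take_no_delim lines i hi hmin),
        List.drop_eq_getElem_cons hi]
    simp only [keepRec, hpi, if_true]
    conv_rhs => rw [← List.take_append_drop j (lines.drop (i+1))]
    rw [skipRec_append_no _ _ (take_no_delim _ j hj hminj),
        List.drop_eq_getElem_cons hj]
    simp only [skipRec, hpj, if_true]
    rw [ih, List.drop_drop]

theorem popBlanksA_eq_altDrop (ls : List String) :
    popBlanksA ls = altDropLeadingBlanks ls := by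
  induction ls with
  | nil => rfl
  | cons l ls ih => simp only [popBlanksA, altDropLeadingBlanks, ih]

-- ===== VERDICT (by name: the statement is the Claim_ definition above) =====
theorem strip_stubs_spec : Claim_equal_strip_stubs := by
  intro code _
  unfold Spec_strip_stubs
  show strip_stubs code = strip_stubs_alt code
  simp only [strip_stubs, strip_stubs_alt]
  set lines := (PySem.Str.split? code "\n").getD [] with hlines
  set n := lines.countP (fun l => PySem.Str.strip l == pvDelim) with hn
  rw [(foldl_step_spec lines [] false).1]
  simp only [List.nil_append, Bool.false_or, ← hn]
  by_cases h1 : n = 1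
  · simp [h1]
  · have hcond : (decide (n % 2 = 1) && !decide (2 ≤ n)) = false := by
      rcases Nat.lt_or_ge n 2 with h | h
      · interval_cases n <;> simp_all
      · simp [h]
    have hne : (n == 1) = false := by simpa using h1
    rw [hcond, hne]
    simp only [Bool.false_eq_true, if_false]
    rw [altRemoveBlocks_eq_keepRec, popBlanksA_eq_altDrop]
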